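-- pv_equiv track=rewrite | github.com/cba-git/opvc-kit | src/opvc/utils.py | merge_contiguous_segments
-- ===== SOURCE A (Python) =====
-- from typing import Any, Dict, Iterable, List, Mapping, MutableMapping, Sequence, Tuple
--
-- def merge_contiguous_segments(idxs_1based: Sequence[int]) -> List[Tuple[int, int]]:
--     """Merge 1-based indices into contiguous (start,end) segments."""
--     if not idxs_1based:
--         return []
--     idxs = sorted(set(int(i) for i in idxs_1based))
--     segs: List[Tuple[int, int]] = []
--     s = e = idxs[0]
--     for i in idxs[1:]:
--         if i == e + 1:
--             e = i
--         else:
--             segs.append((s, e))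
--             s = e = i
--     segs.append((s, e))
--     return segs
-- ===== SOURCE B (Python) =====
-- from typing import List, Sequence, Tuple
--
-- def merge_contiguous_segments(idxs_1based: Sequence[int]) -> List[Tuple[int, int]]:
--     """Merge 1-based indices into contiguous (start,end) segments."""
--     s = {int(i) for i in idxs_1based}
--     segs: List[Tuple[int, int]] = []
--     for n in sorted(s):
--         if n - 1 not in s:          # n starts a segment
--             e = n
--             while e + 1 in s:       # probe neighbours to find its end
--                 e += 1
--             segs.append((n, e))
--     return segs
-- ===== Notes on version B (the rewrite author's own statement) =====
-- stated objective: idiomatic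
-- what changed: Instead of one flat adjacent-difference scan over the sorted list with (start,end) loop state, B keeps a hash set, detects segment starts (n-1 not in the set) and finds each end with a nested while-loop of neighbour membership probes.
import Mathlib
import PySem

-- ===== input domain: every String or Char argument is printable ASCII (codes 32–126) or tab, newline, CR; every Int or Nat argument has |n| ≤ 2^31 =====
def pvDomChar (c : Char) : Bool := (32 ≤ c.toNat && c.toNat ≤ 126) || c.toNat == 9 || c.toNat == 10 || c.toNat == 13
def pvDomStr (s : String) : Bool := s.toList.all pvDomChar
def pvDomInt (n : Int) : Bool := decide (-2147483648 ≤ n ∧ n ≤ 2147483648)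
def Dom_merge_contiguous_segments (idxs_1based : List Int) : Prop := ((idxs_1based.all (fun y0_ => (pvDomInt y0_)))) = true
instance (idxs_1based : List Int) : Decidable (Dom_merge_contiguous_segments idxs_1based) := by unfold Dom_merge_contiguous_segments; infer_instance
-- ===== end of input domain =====

-- B is an idiomatic, structurally different rewrite (set membership with a nested neighbour-probing
-- extend loop instead of one flat adjacent-difference scan); same result, proved equal on all inputs.

-- ===== PORT A =====
def merge_contiguous_segments (idxs_1based : List Int) : List (Int × Int) :=
  if idxs_1based = [] then []
  else
    let idxs := PySem.List.sorted (PySem.Set.ofList idxs_1based) (fun x => x) false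
    match idxs with
    | [] => []  -- unreachable: idxs_1based ≠ [] makes the sorted set nonempty
    | h :: t =>
      let st := t.foldl (fun (acc : Int × Int × List (Int × Int)) i =>
          if i = acc.2.1 + 1 then (acc.1, i, acc.2.2)
          else (i, i, acc.2.2 ++ [(acc.1, acc.2.1)])) (h, h, [])
      st.2.2 ++ [(st.1, st.2.1)]

-- ===== PORT B =====
-- 'while e + 1 in s: e += 1'; fuel = |s| bounds the climb (the climbed values are distinct members of s)
def pvExtend (s : List Int) : Nat → Int → Int
  | 0, e => e
  | k + 1, e => if s.contains (e + 1) then pvExtend s k (e + 1) else e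

def merge_contiguous_segments_alt (idxs_1based : List Int) : List (Int × Int) :=
  let s : PySem.Set Int := PySem.Set.ofList idxs_1based
  (PySem.List.sorted s (fun x => x) false).foldl
    (fun segs n => if !s.contains (n - 1) then segs ++ [(n, pvExtend s s.length n)] else segs) []

-- ===== PRECONDITION & SPEC =====
def Spec_merge_contiguous_segments (idxs_1based : List Int) (out : List (Int × Int)) : Prop := out = merge_contiguous_segments_alt idxs_1based
instance (idxs_1based : List Int) (out : List (Int × Int)) : Decidable (Spec_merge_contiguous_segments idxs_1based out) := by unfold Spec_merge_contiguous_segments; infer_instance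

-- ===== CLAIM (what is proved, stated in full; the proofs are below) =====
def Claim_equal_merge_contiguous_segments : Prop := ∀ (idxs_1based : List Int), Dom_merge_contiguous_segments idxs_1based → Spec_merge_contiguous_segments idxs_1based (merge_contiguous_segments idxs_1based)

-- ===== LEMMAS AND PROOFS =====

-- reference recursion: A's loop written as a structural recursion
def pvGo (s e : Int) : List Int → List (Int × Int)
  | [] => [(s, e)]
  | i :: t => if i = e + 1 then pvGo s i t else (s, e) :: pvGo i i t

def pvR : List Int → List (Int × Int)
  | [] => []
  | h :: t => pvGo h h t

def pvSplitRun : Int → List Int → Int × List Int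
  | e, [] => (e, [])
  | e, i :: t => if i = e + 1 then pvSplitRun i t else (e, i :: t)

def pvChain (a : Int) : Nat → List Int
  | 0 => []
  | n + 1 => a :: pvChain (a + 1) n

lemma pvChain_mem (n : Nat) : ∀ (a m : Int), m ∈ pvChain a n ↔ a ≤ m ∧ m < a + n := by
  induction n with
  | zero => intro a m; simp [pvChain]
  | succ k ih =>
    intro a m
    simp only [pvChain, List.mem_cons, ih]
    omega

lemma pvChain_length (n : Nat) : ∀ a : Int, (pvChain a n).length = n := by
  induction n with
  | zero => intro a; rfl
  | succ k ih => intro a; simp [pvChain, ih]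

lemma pvGo_splitRun (t : List Int) : ∀ s e : Int,
    pvGo s e t = (s, (pvSplitRun e t).1) :: pvR (pvSplitRun e t).2 := by
  induction t with
  | nil => intro s e; simp [pvGo, pvSplitRun, pvR]
  | cons i t ih =>
    intro s e
    by_cases h : i = e + 1
    · subst h
      simp [pvGo, pvSplitRun]
      exact ih s (e + 1)
    · simp [pvGo, pvSplitRun, if_neg h, pvR]

lemma pvSplitRun_spec (t : List Int) : ∀ e : Int, (∀ x ∈ t, e < x) → t.Pairwise (· < ·) →
    e ≤ (pvSplitRun e t).1 ∧
    t = pvChain (e + 1) ((pvSplitRun e t).1 - e).toNat ++ (pvSplitRun e t).2 ∧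
    (∀ x ∈ (pvSplitRun e t).2, (pvSplitRun e t).1 + 1 < x) ∧
    (pvSplitRun e t).2.Pairwise (· < ·) := by
  induction t with
  | nil => intro e _ _; simp [pvSplitRun, pvChain]
  | cons i t ih =>
    intro e hlt hp
    have hi : e < i := hlt i (by simp)
    have hp' : t.Pairwise (· < ·) := hp.of_cons
    have hti : ∀ x ∈ t, i < x := fun x hx => (List.pairwise_cons.1 hp).1 x hx
    by_cases h : i = e + 1
    · subst h
      simp [pvSplitRun]
      obtain ⟨h1, h2, h3, h4⟩ := ih (e + 1) hti hp'
      refine ⟨by omega, ?_, h3, h4⟩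
      have hk : ((pvSplitRun (e + 1) t).1 - e).toNat = ((pvSplitRun (e + 1) t).1 - (e + 1)).toNat + 1 := by
        omega
      rw [hk]
      simp only [pvChain, List.cons_append]
      rw [← h2]
    · simp only [pvSplitRun, if_neg h]
      refine ⟨le_refl e, ?_, ?_, hp⟩
      · have h0 : (e - e).toNat = 0 := by omega
        rw [h0]
        simp [pvChain]
      · intro x hx
        rcases List.mem_cons.1 hx with rfl | hx
        · omega
        · have := hti x hx; omega

lemma pvExtend_val (u : List Int) : ∀ (fuel : Nat) (m e : Int), m ≤ e →
    (∀ k : Int, m < k → k ≤ e → k ∈ u) → (e + 1) ∉ u → (e - m).toNat ≤ fuel →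
    pvExtend u fuel m = e := by
  intro fuel
  induction fuel with
  | zero =>
    intro m e hme hmem hout hf
    have : m = e := by omega
    subst this
    simp only [pvExtend]
  | succ k ih =>
    intro m e hme hmem hout hf
    by_cases h : m = e
    · subst h
      have : ¬ u.contains (m + 1) = true := by
        simp only [List.contains_eq_mem, decide_eq_true_eq]; exact hout
      simp only [pvExtend, if_neg this]
    · have hm1 : (m + 1) ∈ u := hmem (m + 1) (by omega) (by omega)
      have : u.contains (m + 1) = true := by
        simp only [List.contains_eq_mem, decide_eq_true_eq]; exact hm1
      simp only [pvExtend, if_pos this]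
      exact ih (m + 1) e (by omega) (fun k h1 h2 => hmem k (by omega) h2) hout (by omega)

lemma pvMain (u : List Int) (fuel : Nat) : ∀ (N : Nat) (xs : List Int), xs.length ≤ N →
    xs.Pairwise (· < ·) →
    ∀ b : Int, (∀ x ∈ xs, b < x) → (∀ k : Int, b ≤ k → (k ∈ u ↔ k ∈ xs)) →
    xs.length ≤ fuel →
    (xs.filter (fun n => !u.contains (n - 1))).map (fun n => (n, pvExtend u fuel n)) = pvR xs := by
  intro N
  induction N with
  | zero =>
    intro xs hN _ _ _ _ _
    have : xs = [] := List.length_eq_zero_iff.1 (by omega)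
    subst this; simp [pvR]
  | succ N ih =>
    intro xs hN hp b hb hmem hfuel
    match xs, hN with
    | [], _ => simp [pvR]
    | h :: t, hN =>
      have hp' : t.Pairwise (· < ·) := hp.of_cons
      have hht : ∀ x ∈ t, h < x := fun x hx => (List.pairwise_cons.1 hp).1 x hx
      obtain ⟨h1, h2, h3, h4⟩ := pvSplitRun_spec t h hht hp'
      set e := (pvSplitRun h t).1 with he
      set rest := (pvSplitRun h t).2 with hrest
      -- membership characterisation of xs = h :: chain ++ rest
      have hxsmem : ∀ k : Int, k ∈ h :: t ↔ ((h ≤ k ∧ k ≤ e) ∨ k ∈ rest) := by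
        intro k
        rw [h2]
        simp only [List.mem_cons, List.mem_append, pvChain_mem]
        constructor
        · rintro (rfl | ⟨hk1, hk2⟩ | hk); · left; omega
          · left; omega
          · right; exact hk
        · rintro (⟨hk1, hk2⟩ | hk)
          · by_cases hkh : k = h
            · left; exact hkh
            · right; left; omega
          · right; right; exact hk
      -- h - 1 not in u
      have hstart : ¬ ((h : Int) - 1) ∈ u := by
        intro hc
        have := (hmem (h - 1) (by have := hb h (by simp); omega)).1 hc
        rcases (hxsmem (h - 1)).1 this with ⟨hk1, _⟩ | hk
        · omega
        · have := h3 _ hk; omega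
      have hstartb : (!u.contains (h - 1)) = true := by
        simp only [List.contains_eq_mem, Bool.not_eq_true', decide_eq_false_iff_not]; exact hstart
      -- extend from h reaches e
      have hbh : b < h := hb h (by simp)
      have hext : pvExtend u fuel h = e := by
        apply pvExtend_val u fuel h e h1
        · intro k hk1 hk2
          exact (hmem k (by omega)).2 ((hxsmem k).2 (Or.inl ⟨by omega, hk2⟩))
        · intro hc
          have := (hmem (e + 1) (by omega)).1 hc
          rcases (hxsmem (e + 1)).1 this with ⟨_, hk2⟩ | hk
          · omega
          · have := h3 _ hk; omega
        · have hlen : t.length = (e - h).toNat + rest.length := by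
            rw [h2]; simp [pvChain_length]
          simp only [List.length_cons] at hfuel; omega
      -- chain elements are filtered out
      have hchain : (pvChain (h + 1) (e - h).toNat).filter (fun n => !u.contains (n - 1)) = [] := by
        apply List.filter_eq_nil_iff.2
        intro n hn
        have hn' := (pvChain_mem _ _ _).1 hn
        have : (n - 1) ∈ u := by
          apply (hmem (n - 1) (by omega)).2
          exact (hxsmem (n - 1)).2 (Or.inl ⟨by omega, by omega⟩)
        simp only [List.contains_eq_mem, Bool.not_eq_true', decide_eq_false_iff_not]
        exact fun hc => hc this
      -- rest handled by IH with bound e + 1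
      have hrec : (rest.filter (fun n => !u.contains (n - 1))).map (fun n => (n, pvExtend u fuel n)) = pvR rest := by
        have hrl : rest.length ≤ N := by
          have : t.length = (e - h).toNat + rest.length := by
            rw [h2]; simp [pvChain_length]
          simp only [List.length_cons] at hN; omega
        apply ih rest hrl h4 (e + 1) h3
        · intro k hk
          rw [hmem k (by omega), hxsmem k]
          constructor
          · rintro (⟨_, hk2⟩ | hk'); · omega
            · exact hk'
          · exact Or.inr
        · have : t.length = (e - h).toNat + rest.length := by
            rw [h2]; simp [pvChain_length]
          simp only [List.length_cons] at hfuel; omega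
      -- put it together
      rw [pvR, pvGo_splitRun, ← he, ← hrest]
      conv_lhs => rw [show h :: t = h :: (pvChain (h + 1) (e - h).toNat ++ rest) from by rw [← h2]]
      rw [List.filter_cons, if_pos hstartb, List.filter_append, hchain, List.nil_append,
        List.map_cons, hrec, hext]

-- A's foldl equals pvGo
lemma pvFoldA (t : List Int) : ∀ (s e : Int) (segs : List (Int × Int)),
    (let st := t.foldl (fun (acc : Int × Int × List (Int × Int)) i =>
        if i = acc.2.1 + 1 then (acc.1, i, acc.2.2)
        else (i, i, acc.2.2 ++ [(acc.1, acc.2.1)])) (s, e, segs)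
     st.2.2 ++ [(st.1, st.2.1)]) = segs ++ pvGo s e t := by
  induction t with
  | nil => intro s e segs; simp [pvGo]
  | cons i t ih =>
    intro s e segs
    by_cases h : i = e + 1
    · subst h
      simp [pvGo, ih]
    · simp [pvGo, if_neg h, ih]

-- ===== VERDICT (by name: the statement is the Claim_ definition above) =====
theorem merge_contiguous_segments_spec : Claim_equal_merge_contiguous_segments := by
  unfold Claim_equal_merge_contiguous_segments Spec_merge_contiguous_segments
  intro idxs _
  have hA : merge_contiguous_segments idxs
      = pvR (PySem.List.sorted (PySem.Set.ofList idxs) (fun x => x) false) := by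
    unfold merge_contiguous_segments
    by_cases hnil : idxs = []
    · subst hnil; rfl
    · simp only [if_neg hnil]
      cases hx : PySem.List.sorted (PySem.Set.ofList idxs) (fun x => x) false with
      | nil => rfl
      | cons h t =>
        have := pvFoldA t h h []
        simp only [List.nil_append] at this
        simpa [pvR] using this
  have hB : merge_contiguous_segments_alt idxs
      = ((PySem.List.sorted (PySem.Set.ofList idxs) (fun x => x) false).filter
          (fun n => !(PySem.Set.ofList idxs).contains (n - 1))).map
          (fun n => (n, pvExtend (PySem.Set.ofList idxs) (PySem.Set.ofList idxs).length n)) := by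
    unfold merge_contiguous_segments_alt
    rw [PySem.List.foldl_append_if]
    simp
  rw [hA, hB]
  set u : List Int := PySem.Set.ofList idxs with hu
  set xs := PySem.List.sorted u (fun x => x) false with hxs
  have hperm : xs.Perm u := PySem.List.sorted_perm u (fun x => x) false
  have hmemxs : ∀ k : Int, k ∈ u ↔ k ∈ xs := fun k => (hperm.mem_iff).symm
  have hpw : xs.Pairwise (· < ·) := PySem.List.sorted_ofList_pairwise_lt idxs
  have hlen : xs.length = u.length := hperm.length_eq
  cases hx : xs with
  | nil => simp [pvR]
  | cons h t =>
    symm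
    apply pvMain u u.length (h :: t).length (h :: t) (le_refl _) (hx ▸ hpw) (h - 1)
    · intro x hxm
      have hmin : ∀ y ∈ u, h ≤ y := by
        intro y hy
        exact PySem.List.key_head_sorted_le u (fun x => x) (hxs ▸ hx) y hy
      have : x ∈ u := (hmemxs x).2 (hx ▸ hxm)
      have := hmin x this
      omega
    · intro k _
      rw [← hx]
      exact hmemxs k
    · rw [← hx, hlen]
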